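-- pv_equiv track=rewrite | github.com/andlamb2002/lambro-trainer | src/Trainer/Scripts/Generate_PLL_Cases.py | merge_adjacent_u_moves
-- ===== SOURCE A (Python) =====
-- def move_to_int(move):
--     if move == 'U':
--         return 1
--     elif move == "U2":
--         return 2
--     elif move == "U'":
--         return 3
--     else:
--         return None
--
-- def int_to_move(i):
--     if i == 1:
--         return 'U'
--     elif i == 2:
--         return 'U2'
--     elif i == 3:
--         return "U'"
--     else:
--         return ''
--
-- def merge_adjacent_u_moves(moves_list):
--     result = []
--     i = 0
--     while i < len(moves_list):
--         move = moves_list[i]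
--         if move[0] == 'U':
--             total = move_to_int(move)
--             i += 1
--             while i < len(moves_list) and moves_list[i][0] == 'U':
--                 val = move_to_int(moves_list[i])
--                 if val is not None:
--                     total = (total + val) % 4
--                 i += 1
--             if total != 0:
--                 result.append(int_to_move(total))
--         else:
--             result.append(move)
--             i += 1
--     return result
-- ===== SOURCE B (Python) =====
-- def move_to_int(move):
--     if move == 'U':
--         return 1
--     elif move == "U2":
--         return 2
--     elif move == "U'":
--         return 3
--     else:
--         return None
--
-- def int_to_move(i):
--     if i == 1:
--         return 'U'
--     elif i == 2:
--         return 'U2'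
--     elif i == 3:
--         return "U'"
--     else:
--         return ''
--
-- def merge_adjacent_u_moves(moves_list):
--     # Phase 1: split the list into maximal runs keyed by "starts with 'U'".
--     runs = []
--     for m in moves_list:
--         k = (m[0] == 'U')
--         if runs and runs[-1][0] == k:
--             runs[-1][1].append(m)
--         else:
--             runs.append((k, [m]))
--     # Phase 2: fold each U-run into a single move; keep other runs as-is.
--     result = []
--     for is_u, run in runs:
--         if is_u:
--             total = move_to_int(run[0])
--             for m in run[1:]:
--                 val = move_to_int(m)
--                 if val is not None:
--                     total = (total + val) % 4
--             if total != 0: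
--                 result.append(int_to_move(total))
--         else:
--             result.extend(run)
--     return result
-- ===== Notes on version B (the rewrite author's own statement) =====
-- stated objective: alternative
-- what changed: B first splits the input into maximal runs keyed by "token starts with 'U'" (a hand-rolled groupby) and then folds each U-run into a single move with a left fold, instead of A's index-advancing outer/inner while loops.
import Mathlib
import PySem

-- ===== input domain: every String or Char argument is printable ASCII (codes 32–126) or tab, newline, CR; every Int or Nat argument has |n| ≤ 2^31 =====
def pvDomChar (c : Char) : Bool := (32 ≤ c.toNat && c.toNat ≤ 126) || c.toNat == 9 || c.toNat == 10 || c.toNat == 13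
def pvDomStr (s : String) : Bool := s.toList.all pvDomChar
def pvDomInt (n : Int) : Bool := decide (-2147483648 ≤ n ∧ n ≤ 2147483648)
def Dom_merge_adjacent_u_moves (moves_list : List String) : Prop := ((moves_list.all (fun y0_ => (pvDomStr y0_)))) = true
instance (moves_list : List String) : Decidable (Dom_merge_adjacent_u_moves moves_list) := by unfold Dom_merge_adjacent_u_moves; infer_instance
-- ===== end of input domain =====

-- B re-implements A as a two-phase groupby (split into maximal 'U'-keyed runs, then fold each run);
-- same return value wherever A returns (objective: alternative decomposition, not faster).

-- ===== PORT A =====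
-- shared Python helpers (module-level in the source, used by both A and B)
def move_to_int (move : String) : Option Int :=
  if move = "U" then some 1
  else if move = "U2" then some 2
  else if move = "U'" then some 3
  else none

-- Python's int_to_move(i); the argument may be None (A passes a possibly-None total), else-branch gives ''
def int_to_move (i : Option Int) : String :=
  if i = some 1 then "U"
  else if i = some 2 then "U2"
  else if i = some 3 then "U'"
  else ""

-- Python's move[0] == 'U'; on "" Python raises IndexError (such inputs are outside Pre_), we return false
def startsU (m : String) : Bool :=
  match m.toList with
  | [] => false
  | c :: _ => c == 'U'

-- Python's 'val = move_to_int(...); if val is not None: total = (total + val) % 4' on a possibly-None total;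
-- the (none, some v) case is where Python raises TypeError (outside Pre_): we keep none as a poison value
def combineU (t : Option Int) (m : String) : Option Int :=
  match move_to_int m with
  | none => t
  | some v =>
    match t with
    | none => none
    | some tv => some (PySem.Int.mod (tv + v) 4)

-- A's inner while loop: consume U-prefixed moves from the front, returning (total, remaining suffix)
def mergeInner : List String → Option Int → Option Int × List String
  | [], t => (t, [])
  | m :: rest, t =>
    if startsU m then mergeInner rest (combineU t m)
    else (t, m :: rest)

theorem mergeInner_length_le : ∀ (l : List String) (t : Option Int), (mergeInner l t).2.length ≤ l.length
  | [], _ => Nat.le_refl _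
  | m :: rest, t => by
    unfold mergeInner
    by_cases h : startsU m
    · simp only [h, if_true]
      exact Nat.le_trans (mergeInner_length_le rest (combineU t m)) (Nat.le_succ _)
    · simp [h]

-- A's outer while loop
def mergeOuter : List String → List String
  | [] => []
  | m :: rest =>
    if startsU m then
      let p := mergeInner rest (move_to_int m)
      (if p.1 ≠ some 0 then [int_to_move p.1] else []) ++ mergeOuter p.2
    else m :: mergeOuter rest
termination_by l => l.length
decreasing_by
  · simp only [List.length_cons]
    exact Nat.lt_succ_of_le (mergeInner_length_le rest (move_to_int m))
  · simp

def merge_adjacent_u_moves (moves_list : List String) : List String :=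
  mergeOuter moves_list

-- ===== PORT B =====
-- phase 1: append each move to the last run when its key matches, else start a new run
def runStep (runs : List (Bool × List String)) (m : String) : List (Bool × List String) :=
  let k := startsU m
  match runs.getLast? with
  | some (k', run) =>
    if k' = k then runs.dropLast ++ [(k', run ++ [m])]
    else runs ++ [(k, [m])]
  | none => [(k, [m])]

def buildRuns (l : List String) : List (Bool × List String) :=
  l.foldl runStep []

-- phase 2: fold one U-run into its total (seed = move_to_int(run[0]))
def foldRun (run : List String) : Option Int :=
  match run with
  | [] => none  -- unreachable: buildRuns only produces nonempty runs
  | first :: rest => rest.foldl combineU (move_to_int first)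

def processRun (res : List String) (g : Bool × List String) : List String :=
  if g.1 then
    let total := foldRun g.2
    if total ≠ some 0 then res ++ [int_to_move total] else res
  else res ++ g.2

def merge_adjacent_u_moves_alt (moves_list : List String) : List String :=
  (buildRuns moves_list).foldl processRun []

-- ===== PRECONDITION & SPEC =====
-- Pre_ excludes exactly the inputs on which the Python A raises: a list containing an empty-string
-- token (IndexError on move[0]) or a U-run whose first token is an invalid U-token and which later
-- contains a valid U move (TypeError on None + int).
def Pre_merge_adjacent_u_moves (moves_list : List String) : Prop :=
  (∀ m ∈ moves_list, m ≠ "") ∧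
  ¬ ∃ j ∈ List.range moves_list.length, ∃ k ∈ List.range moves_list.length,
      j ≤ k ∧
      (j = 0 ∨ startsU (moves_list.getD (j - 1) "") = false) ∧
      startsU (moves_list.getD j "") = true ∧
      move_to_int (moves_list.getD j "") = none ∧
      (∀ t ∈ List.range moves_list.length, j ≤ t → t ≤ k → startsU (moves_list.getD t "") = true) ∧
      move_to_int (moves_list.getD k "") ≠ none
instance (moves_list : List String) : Decidable (Pre_merge_adjacent_u_moves moves_list) := by
  unfold Pre_merge_adjacent_u_moves; infer_instance

def pvWitness_merge_adjacent_u_moves : List String := ["U", "U2", "R", "U'"]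

def Spec_merge_adjacent_u_moves (moves_list : List String) (out : List String) : Prop := out = merge_adjacent_u_moves_alt moves_list
instance (moves_list : List String) (out : List String) : Decidable (Spec_merge_adjacent_u_moves moves_list out) := by unfold Spec_merge_adjacent_u_moves; infer_instance

-- ===== CLAIM (what is proved, stated in full; the proofs are below) =====
def Claim_equal_merge_adjacent_u_moves : Prop := ∀ (moves_list : List String), Dom_merge_adjacent_u_moves moves_list → Pre_merge_adjacent_u_moves moves_list → Spec_merge_adjacent_u_moves moves_list (merge_adjacent_u_moves moves_list)

-- ===== LEMMAS AND PROOFS =====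
-- right-recursive description of buildRuns' grouping
def chunkFrom (k : Bool) (run : List String) : List String → List (Bool × List String)
  | [] => [(k, run)]
  | m :: rest =>
    if startsU m = k then chunkFrom k (run ++ [m]) rest
    else (k, run) :: chunkFrom (startsU m) [m] rest

def chunk : List String → List (Bool × List String)
  | [] => []
  | m :: rest => chunkFrom (startsU m) [m] rest

theorem foldl_runStep (l : List String) : ∀ (pre : List (Bool × List String)) (k : Bool) (run : List String),
    List.foldl runStep (pre ++ [(k, run)]) l = pre ++ chunkFrom k run l := by
  induction l with
  | nil => intro pre k run; simp [chunkFrom]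
  | cons m rest ih =>
    intro pre k run
    simp only [List.foldl_cons, chunkFrom]
    have hstep : runStep (pre ++ [(k, run)]) m =
        if startsU m = k then pre ++ [(k, run ++ [m])]
        else (pre ++ [(k, run)]) ++ [(startsU m, [m])] := by
      simp only [runStep, List.getLast?_concat, List.dropLast_concat]
      by_cases h : startsU m = k
      · simp [h]
      · simp [h, Ne.symm h]
    by_cases h : startsU m = k
    · simp only [h, if_true] at hstep ⊢
      rw [hstep, ih]
    · simp only [h, if_false] at hstep ⊢
      rw [hstep, ih, List.append_assoc]
      rfl

theorem buildRuns_eq : ∀ (l : List String), buildRuns l = chunk l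
  | [] => rfl
  | m :: rest => by
    have h0 : runStep [] m = [(startsU m, [m])] := by simp [runStep]
    show List.foldl runStep (runStep [] m) rest = chunk (m :: rest)
    rw [h0, chunk]
    exact foldl_runStep rest [] (startsU m) [m]

theorem chunkFrom_eq (l : List String) : ∀ (k : Bool) (run : List String),
    chunkFrom k run l =
      (k, run ++ l.takeWhile (fun m => startsU m == k)) :: chunk (l.dropWhile (fun m => startsU m == k)) := by
  induction l with
  | nil => intro k run; simp [chunkFrom, chunk]
  | cons m rest ih =>
    intro k run
    simp only [chunkFrom, List.takeWhile_cons, List.dropWhile_cons]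
    by_cases h : startsU m = k
    · simp only [h, if_true, beq_self_eq_true, if_true]
      rw [ih k (run ++ [m])]
      simp
    · have hb : (startsU m == k) = false := by simp [h]
      simp only [h, if_false, hb, Bool.false_eq_true, if_false]
      simp [chunk]

theorem processRun_shift (res : List String) (g : Bool × List String) :
    processRun res g = res ++ processRun [] g := by
  unfold processRun
  by_cases h : g.1
  · simp only [h, if_true]
    by_cases ht : foldRun g.2 ≠ some 0 <;> simp [ht]
  · simp [h]

theorem foldl_processRun (runs : List (Bool × List String)) : ∀ (res : List String),
    List.foldl processRun res runs = res ++ runs.flatMap (processRun []) := by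
  induction runs with
  | nil => intro res; simp
  | cons g rs ih =>
    intro res
    simp only [List.foldl_cons, List.flatMap_cons]
    rw [ih, processRun_shift, List.append_assoc]

theorem mergeInner_eq (l : List String) : ∀ (t : Option Int),
    mergeInner l t = (List.foldl combineU t (l.takeWhile startsU), l.dropWhile startsU) := by
  induction l with
  | nil => intro t; simp [mergeInner]
  | cons m rest ih =>
    intro t
    simp only [mergeInner, List.takeWhile_cons, List.dropWhile_cons]
    by_cases h : startsU m
    · simp only [h, if_true]
      rw [ih]
      simp
    · simp [h]

theorem mergeOuter_skip : ∀ (l : List String),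
    mergeOuter l = l.takeWhile (fun m => !startsU m) ++ mergeOuter (l.dropWhile (fun m => !startsU m))
  | [] => by simp [mergeOuter]
  | m :: rest => by
    by_cases h : startsU m
    · simp [h]
    · simp only [List.takeWhile_cons, List.dropWhile_cons, h, Bool.not_false, if_true,
        List.cons_append]
      rw [mergeOuter, if_neg h]
      rw [mergeOuter_skip rest]

theorem mergeOuter_eq : ∀ (l : List String), mergeOuter l = (chunk l).flatMap (processRun [])
  | [] => by simp [mergeOuter, chunk]
  | m :: rest => by
    by_cases h : startsU m
    · have hpred : (fun x => startsU x == startsU m) = startsU := by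
        funext x; simp [h]
      rw [chunk, chunkFrom_eq, hpred, List.flatMap_cons]
      rw [mergeOuter, if_pos h, mergeInner_eq]
      have hIH := mergeOuter_eq (rest.dropWhile startsU)
      simp [processRun, foldRun, hIH, h]
    · have hb : startsU m = false := by simpa using h
      have hpred : (fun x => startsU x == startsU m) = (fun x => !startsU x) := by
        funext x; simp [hb]
      rw [chunk, chunkFrom_eq, hpred, List.flatMap_cons]
      rw [mergeOuter, if_neg h, mergeOuter_skip rest]
      have hIH := mergeOuter_eq (rest.dropWhile (fun x => !startsU x))
      rw [hIH]
      simp [processRun, hb]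
termination_by l => l.length
decreasing_by
  all_goals
    simp only [List.length_cons]
    exact Nat.lt_succ_of_le (List.length_dropWhile_le _ _)

-- ===== VERDICT (by name: the statement is the Claim_ definition above) =====
theorem merge_adjacent_u_moves_spec : Claim_equal_merge_adjacent_u_moves := by
  intro l _ _
  unfold Spec_merge_adjacent_u_moves merge_adjacent_u_moves merge_adjacent_u_moves_alt
  rw [buildRuns_eq, foldl_processRun, mergeOuter_eq]
  simp
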